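-- pv_equiv track=rewrite | github.com/Chissanu/KMITL | PCA/Week4/main.py | m09
-- ===== SOURCE A (Python) =====
-- def m09(n: int):
--     round1s = 0
--     sum = 0
--     while round1s < n:
--         round2s = 0
--         while round2s < (n*n):
--             round3s = 0
--             while round3s < round2s:
--                 sum += 1
--                 round3s += 1
--             round2s += 1
--         round1s += 1
--     return sum
-- ===== SOURCE B (Python) =====
-- def m09(n: int):
--     # closed form: sum of k for k in [0, n*n), repeated n times (0 if n <= 0)
--     return max(n, 0) * (n * n) * (n * n - 1) // 2
-- ===== Notes on version B (the rewrite author's own statement) =====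
-- stated objective: faster
-- what changed: Replaced the triple nested counting loop with the closed-form formula max(n,0)*n^2*(n^2-1)//2.
import Mathlib
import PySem

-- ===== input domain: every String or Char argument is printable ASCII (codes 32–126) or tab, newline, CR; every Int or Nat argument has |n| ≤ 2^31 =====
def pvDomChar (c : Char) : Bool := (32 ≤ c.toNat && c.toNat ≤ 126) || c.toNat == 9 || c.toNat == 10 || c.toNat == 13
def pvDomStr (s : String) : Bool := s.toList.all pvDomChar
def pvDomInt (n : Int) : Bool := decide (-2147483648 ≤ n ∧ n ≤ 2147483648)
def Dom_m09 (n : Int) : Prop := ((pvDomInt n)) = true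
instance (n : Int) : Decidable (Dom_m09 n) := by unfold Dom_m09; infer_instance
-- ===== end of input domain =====

-- B replaces A's triple nested counting loop by a closed-form arithmetic formula (faster).

-- ===== PORT A =====
-- inner `while round3s < round2s` loop
def m09Loop3 (round3s bound sum : Int) : Int :=
  if round3s < bound then m09Loop3 (round3s + 1) bound (sum + 1) else sum
  termination_by (bound - round3s).toNat
  decreasing_by omega

-- middle `while round2s < n*n` loop
def m09Loop2 (round2s nsq sum : Int) : Int :=
  if round2s < nsq then m09Loop2 (round2s + 1) nsq (m09Loop3 0 round2s sum) else sum
  termination_by (nsq - round2s).toNat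
  decreasing_by omega

-- outer `while round1s < n` loop
def m09Loop1 (round1s n sum : Int) : Int :=
  if round1s < n then m09Loop1 (round1s + 1) n (m09Loop2 0 (n * n) sum) else sum
  termination_by (n - round1s).toNat
  decreasing_by omega

def m09 (n : Int) : Int := m09Loop1 0 n 0

-- ===== PORT B =====
def m09_alt (n : Int) : Int :=
  PySem.Int.floordiv (max n 0 * (n * n) * (n * n - 1)) 2

-- ===== PRECONDITION & SPEC =====
def Spec_m09 (n : Int) (out : Int) : Prop := out = m09_alt n
instance (n : Int) (out : Int) : Decidable (Spec_m09 n out) := by unfold Spec_m09; infer_instance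

-- ===== CLAIM =====
def Claim_equal_m09 : Prop := ∀ (n : Int), Dom_m09 n → Spec_m09 n (m09 n)

-- ===== LEMMAS AND PROOFS =====
theorem m09Loop3_eq (r b s : Int) : m09Loop3 r b s = s + max (b - r) 0 := by
  by_cases h : r < b
  · rw [m09Loop3]
    simp only [h, if_true]
    rw [m09Loop3_eq (r + 1) b (s + 1)]
    omega
  · rw [m09Loop3]
    simp only [h, if_false]
    omega
  termination_by (b - r).toNat
  decreasing_by omega

theorem m09Loop2_eq (r b s : Int) (hr : 0 ≤ r) (hrb : r ≤ b) :
    2 * m09Loop2 r b s = 2 * s + (b * (b - 1) - r * (r - 1)) := by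
  by_cases h : r < b
  · rw [m09Loop2]
    simp only [h, if_true]
    rw [m09Loop2_eq (r + 1) b _ (by omega) (by omega)]
    rw [m09Loop3_eq]
    have : max (r - 0) 0 = r := by omega
    rw [this]
    ring
  · have : r = b := le_antisymm hrb (le_of_not_gt h)
    subst this
    rw [m09Loop2]
    simp only [lt_irrefl, if_false]
    ring
  termination_by (b - r).toNat
  decreasing_by omega

theorem m09Loop1_eq (r n s : Int) :
    2 * m09Loop1 r n s = 2 * s + max (n - r) 0 * (n * n * (n * n - 1)) := by
  by_cases h : r < n
  · rw [m09Loop1]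
    simp only [h, if_true]
    rw [m09Loop1_eq (r + 1) n _]
    have h2 := m09Loop2_eq 0 (n * n) s (le_refl 0) (mul_self_nonneg n)
    have hmax : max (n - r) 0 = (n - (r + 1)) + 1 := by omega
    rw [hmax]
    have hmax2 : max (n - (r + 1)) 0 = n - (r + 1) := by omega
    rw [hmax2] at *
    nlinarith [h2]
  · rw [m09Loop1]
    simp only [h, if_false]
    have : max (n - r) 0 = 0 := by omega
    rw [this]
    ring
  termination_by (n - r).toNat
  decreasing_by omega

-- ===== VERDICT =====
theorem m09_spec : Claim_equal_m09 := by
  intro n _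
  unfold Spec_m09 m09 m09_alt
  have h := m09Loop1_eq 0 n 0
  have hmax : max (n - 0) 0 = max n 0 := by omega
  rw [hmax] at h
  have heven : max n 0 * (n * n) * (n * n - 1) = 2 * m09Loop1 0 n 0 := by
    rw [h]; ring
  rw [PySem.Int.floordiv, heven]
  exact (Int.mul_fdiv_cancel_left _ (by norm_num)).symm
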